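-- pv_equiv track=rewrite | github.com/daniel-reich/ubiquitous-fiesta | zp64GNJQpZyGpYWL8_15.py | score_it
-- ===== SOURCE A (Python) =====
-- def score_it(s):
--   ret = 0
--   level = 0
--   num = ''
--   for i in s:
--     if i == '(':
--       if num!='':
--         ret+=int(num)*level
--         num=''
--       level+=1
--     elif i == ')':
--       if num!='':
--         ret+=int(num)*level
--         num=''
--       level-=1
--     elif i.isdigit():
--       num+=i
--   return ret
-- ===== SOURCE B (Python) =====
-- def score_it(s):
--     # tokenize: (content-before-paren, paren) pairs; trailing content is dropped
--     pairs = []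
--     cur = []
--     for c in s:
--         if c in '()':
--             pairs.append((cur, c))
--             cur = []
--         else:
--             cur.append(c)
--     ret = 0
--     level = 0
--     for seg, p in pairs:
--         d = ''.join(ch for ch in seg if ch.isdigit())
--         if d:
--             ret += int(d) * level
--         level += 1 if p == '(' else -1
--     return ret
-- ===== Notes on version B (the rewrite author's own statement) =====
-- stated objective: alternative
-- what changed: Replaces the single-pass character state machine (mutable ret/level/num updated per char) with a tokenize-then-score decomposition: first split the string into (segment, paren) pairs, then fold over the pairs, extracting each segment's digits in one filter.
import Mathlib
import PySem

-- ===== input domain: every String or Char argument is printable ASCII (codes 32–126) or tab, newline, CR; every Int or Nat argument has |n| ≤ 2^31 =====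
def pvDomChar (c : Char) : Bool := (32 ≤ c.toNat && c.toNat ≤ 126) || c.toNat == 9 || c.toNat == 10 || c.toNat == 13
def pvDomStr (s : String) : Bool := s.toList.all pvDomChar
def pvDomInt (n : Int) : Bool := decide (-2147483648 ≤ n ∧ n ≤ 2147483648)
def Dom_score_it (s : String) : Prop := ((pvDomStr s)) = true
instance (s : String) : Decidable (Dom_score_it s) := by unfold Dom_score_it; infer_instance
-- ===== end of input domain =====

-- B replaces A's single-pass character state machine with a tokenize-then-score decomposition (same cost, no speed claim).


-- shared helper: Python's int(num) for the nonempty digit strings both programs build (exact there)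
def pvIntOf (cs : List Char) : Int := (PySem.Int.ofChars? cs).getD 0

-- ===== PORT A =====
-- A's loop state: (ret, level, num), num kept as the list of accumulated digit chars
def scoreItLoopA : List Char → Int → Int → List Char → Int
  | [], ret, _, _ => ret
  | c :: rest, ret, level, num =>
    if c = '(' then
      if num ≠ [] then scoreItLoopA rest (ret + pvIntOf num * level) (level + 1) []
      else scoreItLoopA rest ret (level + 1) num
    else if c = ')' then
      if num ≠ [] then scoreItLoopA rest (ret + pvIntOf num * level) (level - 1) []
      else scoreItLoopA rest ret (level - 1) num
    else if PySem.Chars.isdigit c then scoreItLoopA rest ret level (num ++ [c])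
    else scoreItLoopA rest ret level num

def score_it (s : String) : Int := scoreItLoopA s.toList 0 0 []

-- ===== PORT B =====
-- B's first pass: split into (segment, paren) pairs; trailing segment dropped
def scoreItTok : List Char → List Char → List (List Char × Char)
  | [], _ => []
  | c :: rest, cur =>
    if c = '(' ∨ c = ')' then (cur, c) :: scoreItTok rest []
    else scoreItTok rest (cur ++ [c])

-- B's second pass: fold over the pairs
def scoreItFold : List (List Char × Char) → Int → Int → Int
  | [], ret, _ => ret
  | (seg, p) :: ts, ret, level =>
    let d := seg.filter PySem.Chars.isdigit
    scoreItFold ts (if d ≠ [] then ret + pvIntOf d * level else ret)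
      (level + if p = '(' then 1 else -1)

def score_it_alt (s : String) : Int := scoreItFold (scoreItTok s.toList []) 0 0

-- ===== PRECONDITION & SPEC =====
def Spec_score_it (s : String) (out : Int) : Prop := out = score_it_alt s
instance (s : String) (out : Int) : Decidable (Spec_score_it s out) := by unfold Spec_score_it; infer_instance

-- ===== CLAIM (what is proved, stated in full; the proofs are below) =====
def Claim_equal_score_it : Prop := ∀ (s : String), Dom_score_it s → Spec_score_it s (score_it s)

-- ===== LEMMAS AND PROOFS =====
-- Invariant: A's num is exactly the digits of B's current segment.
theorem scoreIt_loop_eq (rest : List Char) :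
    ∀ (cur : List Char) (ret level : Int),
      scoreItLoopA rest ret level (cur.filter PySem.Chars.isdigit) =
        scoreItFold (scoreItTok rest cur) ret level := by
  induction rest with
  | nil => intro cur ret level; simp [scoreItLoopA, scoreItTok, scoreItFold]
  | cons c rest ih =>
    intro cur ret level
    by_cases h1 : c = '('
    · subst h1
      simp only [scoreItLoopA, scoreItTok]
      rw [if_pos trivial, if_pos (Or.inl trivial)]
      by_cases hd : cur.filter PySem.Chars.isdigit = []
      · rw [if_neg (by simp [hd])]
        simpa [scoreItFold, hd] using ih [] ret (level + 1)
      · rw [if_pos hd]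
        simpa [scoreItFold, hd] using ih [] (ret + pvIntOf (cur.filter PySem.Chars.isdigit) * level) (level + 1)
    · by_cases h2 : c = ')'
      · subst h2
        simp only [scoreItLoopA, scoreItTok]
        rw [if_pos trivial, if_pos (Or.inr trivial)]
        by_cases hd : cur.filter PySem.Chars.isdigit = []
        · rw [if_neg (by simp [hd])]
          simpa [scoreItFold, hd] using ih [] ret (level - 1)
        · rw [if_pos hd]
          simpa [scoreItFold, hd] using ih [] (ret + pvIntOf (cur.filter PySem.Chars.isdigit) * level) (level - 1)
      · by_cases h3 : PySem.Chars.isdigit c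
        · have hf : (cur ++ [c]).filter PySem.Chars.isdigit
              = cur.filter PySem.Chars.isdigit ++ [c] := by
            simp [List.filter_append, h3]
          simp only [scoreItLoopA, scoreItTok]
          rw [if_neg h1, if_neg h2, if_pos h3, if_neg (by simp [h1, h2]), ← hf]
          exact ih (cur ++ [c]) ret level
        · have hf : (cur ++ [c]).filter PySem.Chars.isdigit
              = cur.filter PySem.Chars.isdigit := by
            simp [List.filter_append, h3]
          simp only [scoreItLoopA, scoreItTok]
          rw [if_neg h1, if_neg h2, if_neg (by simpa using h3), if_neg (by simp [h1, h2]), ← hf]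
          exact ih (cur ++ [c]) ret level

-- ===== VERDICT (by name: the statement is the Claim_ definition above) =====
theorem score_it_spec : Claim_equal_score_it := by
  intro s _
  unfold Spec_score_it score_it score_it_alt
  simpa using scoreIt_loop_eq s.toList [] 0 0
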